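-- pv_equiv track=rewrite | github.com/alexandraback/datacollection | solutions_5639104758808576_1/Python/QuantumCaffeine/ovation.py | solve
-- ===== SOURCE A (Python) =====
-- def solve(maxShy, people):
--     extra, current = 0, 0
--     for required, new in enumerate(people):
--         if required > current:
--             needed = required - current
--             extra += needed
--             current += needed
--         current += int(new)
--     return extra
-- ===== SOURCE B (Python) =====
-- def solve(maxShy, people):
--     # stage 1: raw prefix sums (sum of people before each position), never topped up
--     prefixes = []
--     total = 0
--     for x in people:
--         prefixes.append(total)
--         total += int(x)
--     # stage 2: answer is the largest deficit i - prefixes[i], floored at 0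
--     return max([0] + [i - p for i, p in enumerate(prefixes)])
-- ===== Notes on version B (the rewrite author's own statement) =====
-- stated objective: alternative
-- what changed: B is two staged passes: first build the list of raw (never topped-up) prefix sums, then take the maximum deficit i - prefix over them (floored at 0), instead of A's single greedy pass mutating a topped-up 'current' counter and accumulating top-ups.
import Mathlib
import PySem

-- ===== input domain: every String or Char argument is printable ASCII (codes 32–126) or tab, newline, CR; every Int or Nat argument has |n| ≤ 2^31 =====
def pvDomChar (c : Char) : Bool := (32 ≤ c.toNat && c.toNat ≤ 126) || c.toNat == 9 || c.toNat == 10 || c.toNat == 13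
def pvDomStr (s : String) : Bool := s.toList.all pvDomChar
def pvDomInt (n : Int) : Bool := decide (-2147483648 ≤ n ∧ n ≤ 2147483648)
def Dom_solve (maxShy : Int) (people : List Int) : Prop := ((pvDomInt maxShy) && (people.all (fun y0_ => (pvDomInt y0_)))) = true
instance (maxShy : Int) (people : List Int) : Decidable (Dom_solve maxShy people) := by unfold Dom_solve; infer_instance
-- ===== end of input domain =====

-- B builds the raw prefix-sum list in one pass, then takes the maximum deficit i - prefix in a second pass (alternative decomposition, same O(n) cost).


-- ===== PORT A =====
-- loop of A over enumerate(people): state (extra, current), index `required`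
def solveLoopA (extra current : Int) (required : Int) : List Int → Int
  | [] => extra
  | new :: rest =>
    if required > current then
      let needed := required - current
      solveLoopA (extra + needed) (current + needed + new) (required + 1) rest
    else
      solveLoopA extra (current + new) (required + 1) rest

def solve (maxShy : Int) (people : List Int) : Int :=
  solveLoopA 0 0 0 people

-- ===== PORT B =====
-- stage 1 of B: the list of raw prefix sums (sum of people before each position)
def prefixesB (total : Int) : List Int → List Int
  | [] => []
  | x :: rest => total :: prefixesB (total + x) rest

-- stage 2 of B: the deficits i - prefixes[i] of enumerate(prefixes)
def deficitsB (i : Int) : List Int → List Int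
  | [] => []
  | p :: rest => (i - p) :: deficitsB (i + 1) rest

def solve_alt (maxShy : Int) (people : List Int) : Int :=
  (deficitsB 0 (prefixesB 0 people)).foldl max 0

-- ===== PRECONDITION & SPEC =====
def Spec_solve (maxShy : Int) (people : List Int) (out : Int) : Prop := out = solve_alt maxShy people
instance (maxShy : Int) (people : List Int) (out : Int) : Decidable (Spec_solve maxShy people out) := by unfold Spec_solve; infer_instance

-- ===== CLAIM (what is proved, stated in full; the proofs are below) =====
def Claim_equal_solve : Prop := ∀ (maxShy : Int) (people : List Int), Dom_solve maxShy people → Spec_solve maxShy people (solve maxShy people)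

-- ===== LEMMAS AND PROOFS =====

-- Invariant: A's current equals B's raw prefix plus A's accumulated extra.
lemma loop_eq (l : List Int) : ∀ (i e p : Int),
    solveLoopA e (p + e) i l = (deficitsB i (prefixesB p l)).foldl max e := by
  induction l with
  | nil => intro i e p; rfl
  | cons x rest ih =>
    intro i e p
    simp only [solveLoopA, prefixesB, deficitsB, List.foldl]
    split_ifs with h
    · have h1 : e + (i - (p + e)) = i - p := by ring
      have h2 : p + e + (i - (p + e)) + x = (p + x) + (i - p) := by ring
      have h3 : max e (i - p) = i - p := by omega
      rw [h1, h2, h3, ih (i + 1) (i - p) (p + x)]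
    · have h3 : max e (i - p) = e := by omega
      have h2 : p + e + x = (p + x) + e := by ring
      rw [h2, h3, ih (i + 1) e (p + x)]

-- ===== VERDICT (by name: the statement is the Claim_ definition above) =====
theorem solve_spec : Claim_equal_solve := by
  intro maxShy people _
  unfold Spec_solve solve solve_alt
  simpa using loop_eq people 0 0 0
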